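-- pv_equiv track=rewrite | github.com/MitkoZhelev/SoftUni_advanced_MultiDimensional_Lists | Knight_Game_Test.py | position_and_max_kills
-- ===== SOURCE A (Python) =====
-- def is_valid(matrix, pot_row, pot_col):
--     return 0 <= pot_row < len(matrix) and 0 <= pot_col < len(matrix)
--
-- def get_kills(matrix, row, col):
--     kills = 0
--     for index in range(len(rows)):
--         potential_row = row + rows[index]
--         potential_col = col + cols[index]
--         if is_valid(matrix, potential_row, potential_col):
--             potential_position = matrix[potential_row][potential_col]
--             if potential_position == "K":
--                 kills += 1
--     return kills
--
-- def position_and_max_kills(matrix):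
--     max_kills = 0
--     killer_position = []
--     for row_index in range(len(matrix)):
--         for col_index in range(len(matrix)):
--             if matrix[row_index][col_index] == "K":
--                 kills = get_kills(matrix, row_index, col_index)
--                 if kills > max_kills:
--                     max_kills = kills
--                     killer_position = [row_index, col_index]
--     return max_kills, killer_position
--
-- rows = [-2, -2, 2, 2, 1, 1, -1, -1]
--
-- cols = [-1, 1, -1, 1, -2, 2, -2, 2]
-- ===== SOURCE B (Python) =====
-- ROWS = [-2, -2, 2, 2, 1, 1, -1, -1]
-- COLS = [-1, 1, -1, 1, -2, 2, -2, 2]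
--
-- def position_and_max_kills(matrix):
--     # Scatter pass: each knight adds 1 to every square it attacks; by symmetry of
--     # knight moves, a square's tally is exactly the number of knights attacking it,
--     # i.e. the number of kills a knight standing there would make.
--     n = len(matrix)
--     counts = {}
--     for r in range(n):
--         for c in range(n):
--             if matrix[r][c] == "K":
--                 for dr, dc in zip(ROWS, COLS):
--                     tr, tc = r + dr, c + dc
--                     if 0 <= tr < n and 0 <= tc < n:
--                         counts[(tr, tc)] = counts.get((tr, tc), 0) + 1
--     # Read pass: first knight with the strictly largest tally wins.
--     max_kills = 0
--     killer_position = []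
--     for r in range(n):
--         for c in range(n):
--             if matrix[r][c] == "K" and counts.get((r, c), 0) > max_kills:
--                 max_kills = counts.get((r, c), 0)
--                 killer_position = [r, c]
--     return max_kills, killer_position
-- ===== Notes on version B (the rewrite author's own statement) =====
-- stated objective: alternative
-- what changed: Replaces per-knight gather scans (calling get_kills for every knight) with a scatter pass that increments a (row,col)-keyed counter dict for every square each knight attacks, then a read pass that looks each knight's tally up; knight-move symmetry makes the tally equal the kill count.
import Mathlib
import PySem

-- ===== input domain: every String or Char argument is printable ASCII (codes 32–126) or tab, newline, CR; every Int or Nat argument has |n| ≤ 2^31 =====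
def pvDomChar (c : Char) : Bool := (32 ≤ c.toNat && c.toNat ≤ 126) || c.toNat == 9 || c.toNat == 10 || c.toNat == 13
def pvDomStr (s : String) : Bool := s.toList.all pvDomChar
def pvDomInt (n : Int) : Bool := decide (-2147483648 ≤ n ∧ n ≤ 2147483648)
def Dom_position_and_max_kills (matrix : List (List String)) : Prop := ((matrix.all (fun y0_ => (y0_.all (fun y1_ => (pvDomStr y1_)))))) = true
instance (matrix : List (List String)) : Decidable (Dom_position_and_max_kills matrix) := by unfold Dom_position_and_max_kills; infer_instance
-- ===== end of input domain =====

-- B replaces A's per-knight gather scan (get_kills per knight) with one scatter pass that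
-- tallies, in a (row,col)-keyed counter dict, how many knights attack each square (equal to
-- that square's kill count by knight-move symmetry), then a read pass picks the first maximum.

-- shared literal offset tables (Python module constants 'rows' and 'cols')
def pvRows : List Int := [-2, -2, 2, 2, 1, 1, -1, -1]
def pvCols : List Int := [-1, 1, -1, 1, -2, 2, -2, 2]

-- matrix[x][y] (indices are nonnegative and in range on every admitted input)
def pvCell (matrix : List (List String)) (x y : Int) : String :=
  PySem.List.pyGetD (PySem.List.pyGetD matrix x []) y ""

-- ===== PORT A =====
def pvIsValid (matrix : List (List String)) (pr pc : Int) : Bool :=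
  decide (0 ≤ pr ∧ pr < (matrix.length : Int) ∧ 0 ≤ pc ∧ pc < (matrix.length : Int))

def pvGetKills (matrix : List (List String)) (row col : Int) : Int :=
  (List.zip pvRows pvCols).foldl (fun kills off =>
    if pvIsValid matrix (row + off.1) (col + off.2) then
      if pvCell matrix (row + off.1) (col + off.2) = "K" then kills + 1 else kills
    else kills) 0

def position_and_max_kills (matrix : List (List String)) : Int × List Int :=
  (PySem.List.pyRange 0 (matrix.length : Int) 1).foldl (fun st ri =>
    (PySem.List.pyRange 0 (matrix.length : Int) 1).foldl (fun st ci =>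
      if pvCell matrix ri ci = "K" then
        let kills := pvGetKills matrix ri ci
        if kills > st.1 then (kills, [ri, ci]) else st
      else st) st) (0, ([] : List Int))

-- ===== PORT B =====
-- scatter pass: counts[(tr,tc)] = number of knights attacking square (tr,tc)
def pvCounts (matrix : List (List String)) : PySem.Dict (Int × Int) Int :=
  (PySem.List.pyRange 0 (matrix.length : Int) 1).foldl (fun d r =>
    (PySem.List.pyRange 0 (matrix.length : Int) 1).foldl (fun d c =>
      if pvCell matrix r c = "K" then
        (List.zip pvRows pvCols).foldl (fun d off =>
          if 0 ≤ r + off.1 ∧ r + off.1 < (matrix.length : Int) ∧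
              0 ≤ c + off.2 ∧ c + off.2 < (matrix.length : Int) then
            d.insert (r + off.1, c + off.2) (d.getD (r + off.1, c + off.2) 0 + 1)
          else d) d
      else d) d) PySem.Dict.empty

def position_and_max_kills_alt (matrix : List (List String)) : Int × List Int :=
  let counts := pvCounts matrix
  (PySem.List.pyRange 0 (matrix.length : Int) 1).foldl (fun st r =>
    (PySem.List.pyRange 0 (matrix.length : Int) 1).foldl (fun st c =>
      if pvCell matrix r c = "K" ∧ counts.getD (r, c) 0 > st.1 then
        (counts.getD (r, c) 0, [r, c])
      else st) st) (0, ([] : List Int))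

-- ===== PRECONDITION & SPEC =====
-- Pre_ excludes exactly the ragged matrices on which the Python raises IndexError: both
-- passes read matrix[i][j] for all i, j < len(matrix), so every row needs ≥ len(matrix) cells.
def Pre_position_and_max_kills (matrix : List (List String)) : Prop :=
  ∀ row ∈ matrix, matrix.length ≤ row.length
instance (matrix : List (List String)) : Decidable (Pre_position_and_max_kills matrix) := by
  unfold Pre_position_and_max_kills; infer_instance

def pvWitness_position_and_max_kills : List (List String) :=
  [["K", "0", "K"], ["0", "0", "0"], ["K", "0", "0"]]

def Spec_position_and_max_kills (matrix : List (List String)) (out : Int × List Int) : Prop := out = position_and_max_kills_alt matrix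
instance (matrix : List (List String)) (out : Int × List Int) : Decidable (Spec_position_and_max_kills matrix out) := by unfold Spec_position_and_max_kills; infer_instance

-- ===== CLAIM (what is proved, stated in full; the proofs are below) =====
def Claim_equal_position_and_max_kills : Prop := ∀ (matrix : List (List String)), Dom_position_and_max_kills matrix → Pre_position_and_max_kills matrix → Spec_position_and_max_kills matrix (position_and_max_kills matrix)

-- ===== LEMMAS AND PROOFS =====

-- 0/1 indicator of "(x,y) is on the board and holds a knight"
def pvInd (matrix : List (List String)) (x y : Int) : Int :=
  if (0 ≤ x ∧ x < (matrix.length : Int) ∧ 0 ≤ y ∧ y < (matrix.length : Int)) ∧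
      pvCell matrix x y = "K" then 1 else 0

theorem pvOffs_eq : List.zip pvRows pvCols =
    [(-2, -1), (-2, 1), (2, -1), (2, 1), (1, -2), (1, 2), (-1, -2), (-1, 2)] := rfl

-- A's gather count as a sum of the 8 board-indicator terms
theorem gather_eq (matrix : List (List String)) (r c : Int) :
    pvGetKills matrix r c =
      pvInd matrix (r - 2) (c - 1) + pvInd matrix (r - 2) (c + 1) +
      pvInd matrix (r + 2) (c - 1) + pvInd matrix (r + 2) (c + 1) +
      pvInd matrix (r + 1) (c - 2) + pvInd matrix (r + 1) (c + 2) +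
      pvInd matrix (r - 1) (c - 2) + pvInd matrix (r - 1) (c + 2) := by
  have hbody : (fun (kills : Int) (off : Int × Int) =>
      if pvIsValid matrix (r + off.1) (c + off.2) then
        if pvCell matrix (r + off.1) (c + off.2) = "K" then kills + 1 else kills
      else kills)
    = fun kills off => kills +
        (if (pvIsValid matrix (r + off.1) (c + off.2) = true ∧
             pvCell matrix (r + off.1) (c + off.2) = "K") then (1:Int) else 0) := by
    funext kills off
    split_ifs <;> simp_all
  unfold pvGetKills
  rw [hbody, PySem.List.foldl_add]
  show (0:Int) + _ = _
  have h2 : ∀ x : Int, x + (-2) = x - 2 := fun x => by ring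
  have h1 : ∀ x : Int, x + (-1) = x - 1 := fun x => by ring
  simp only [List.zip, pvRows, pvCols, List.zipWith, List.map_cons, List.map_nil,
    List.sum_cons, List.sum_nil, pvIsValid, decide_eq_true_eq, h1, h2, pvInd]
  ring

-- picking a single Int from a list by an equality constraint inside a 0/1 sum
theorem sum_pick (l : List Int) (hl : l.Nodup) (a : Int) (P : Int → Prop) [DecidablePred P] :
    (l.map (fun x => if x = a ∧ P x then (1 : Int) else 0)).sum =
      if a ∈ l ∧ P a then 1 else 0 := by
  induction l with
  | nil => simp
  | cons b l ih =>
    rw [List.nodup_cons] at hl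
    simp only [List.map_cons, List.sum_cons, List.mem_cons, ih hl.2]
    by_cases hba : b = a
    · subst hba
      have : b ∉ l := hl.1
      by_cases hP : P b <;> simp [hP, this]
    · have : a = b ↔ False := by constructor <;> intro h <;> simp_all [eq_comm]
      simp [hba, this]

-- the double range sum picking the single board cell (x,y)
theorem pick2 (matrix : List (List String)) (x y : Int) :
    ((PySem.List.pyRange 0 (matrix.length : Int) 1).map (fun r' =>
      ((PySem.List.pyRange 0 (matrix.length : Int) 1).map (fun c' =>
        if pvCell matrix r' c' = "K" ∧ r' = x ∧ c' = y then (1 : Int) else 0)).sum)).sum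
    = pvInd matrix x y := by
  have hinner : ∀ r' : Int,
      ((PySem.List.pyRange 0 (matrix.length : Int) 1).map (fun c' =>
        if pvCell matrix r' c' = "K" ∧ r' = x ∧ c' = y then (1 : Int) else 0)).sum
      = if r' = x ∧ ((0:Int) ≤ y ∧ y < (matrix.length : Int)) ∧ pvCell matrix r' y = "K"
          then 1 else 0 := by
    intro r'
    have hc : (fun c' => if pvCell matrix r' c' = "K" ∧ r' = x ∧ c' = y then (1 : Int) else 0)
        = fun c' => if c' = y ∧ (pvCell matrix r' c' = "K" ∧ r' = x) then (1 : Int) else 0 := by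
      funext c'; exact if_congr (by tauto) rfl rfl
    rw [hc, sum_pick _ (PySem.List.nodup_pyRange_one 0 _) y _]
    refine if_congr ?_ rfl rfl
    rw [PySem.List.mem_pyRange_one]; tauto
  have hmap : ((PySem.List.pyRange 0 (matrix.length : Int) 1).map (fun r' =>
      ((PySem.List.pyRange 0 (matrix.length : Int) 1).map (fun c' =>
        if pvCell matrix r' c' = "K" ∧ r' = x ∧ c' = y then (1 : Int) else 0)).sum))
      = ((PySem.List.pyRange 0 (matrix.length : Int) 1).map (fun r' =>
        if r' = x ∧ (((0:Int) ≤ y ∧ y < (matrix.length : Int)) ∧ pvCell matrix r' y = "K")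
          then (1:Int) else 0)) := by
    apply List.map_congr_left
    intro r' _
    rw [hinner r']
  rw [hmap, sum_pick _ (PySem.List.nodup_pyRange_one 0 _) x _]
  unfold pvInd
  refine if_congr ?_ rfl rfl
  rw [PySem.List.mem_pyRange_one]
  constructor
  · rintro ⟨⟨h1, h2⟩, ⟨h3, h4⟩, h5⟩; exact ⟨⟨h1, h2, h3, h4⟩, h5⟩
  · rintro ⟨⟨h1, h2, h3, h4⟩, h5⟩; exact ⟨⟨h1, h2⟩, ⟨h3, h4⟩, h5⟩

-- the count a filtered-scatter list contributes to key k, as a 0/1 sum over the offsets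
theorem count_filter_map {α β : Type} [BEq β] [LawfulBEq β] [DecidableEq β] (l : List α) (B : α → Bool) (tgt : α → β) (k : β) :
    ((((l.filter B).map tgt).count k : Int)) =
      (l.map (fun off => if B off ∧ tgt off = k then (1 : Int) else 0)).sum := by
  induction l with
  | nil => simp
  | cons a l ih =>
    by_cases hB : B a
    · rw [List.filter_cons_of_pos hB, List.map_cons, List.count_cons, List.map_cons,
        List.sum_cons]
      push_cast
      rw [ih, add_comm]
      congr 1
      refine if_congr ?_ rfl rfl
      rw [beq_iff_eq]
      exact ⟨fun h => ⟨hB, h⟩, fun h => h.2⟩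
    · rw [List.filter_cons_of_neg hB, List.map_cons, List.sum_cons, ih]
      simp [hB]

-- inserting at a computed key is a plain counting fold over the mapped keys
theorem pv_foldl_insert_key (l : List (Int × Int)) (g : Int × Int → Int × Int)
    (d : PySem.Dict (Int × Int) Int) :
    l.foldl (fun d off => d.insert (g off) (d.getD (g off) 0 + 1)) d
      = (l.map g).foldl (fun d t => d.insert t (d.getD t 0 + 1)) d := by
  induction l generalizing d with
  | nil => rfl
  | cons a l ih => simp only [List.foldl_cons, List.map_cons, ih]

-- one scatter cell's getD as "previous + contribution"
theorem scatter_cell (matrix : List (List String)) (r' c' : Int)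
    (d : PySem.Dict (Int × Int) Int) (k : Int × Int) :
    ((if pvCell matrix r' c' = "K" then
        (List.zip pvRows pvCols).foldl (fun d off =>
          if 0 ≤ r' + off.1 ∧ r' + off.1 < (matrix.length : Int) ∧
              0 ≤ c' + off.2 ∧ c' + off.2 < (matrix.length : Int) then
            d.insert (r' + off.1, c' + off.2) (d.getD (r' + off.1, c' + off.2) 0 + 1)
          else d) d
      else d).getD k 0) =
      d.getD k 0 + ((List.zip pvRows pvCols).map (fun off =>
        if pvCell matrix r' c' = "K" ∧
            (0 ≤ r' + off.1 ∧ r' + off.1 < (matrix.length : Int) ∧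
             0 ≤ c' + off.2 ∧ c' + off.2 < (matrix.length : Int)) ∧
            (r' + off.1, c' + off.2) = k then (1 : Int) else 0)).sum := by
  by_cases hK : pvCell matrix r' c' = "K"
  · rw [if_pos hK]
    rw [PySem.List.foldl_ite_eq_foldl_filter
      (p := fun off : Int × Int => 0 ≤ r' + off.1 ∧ r' + off.1 < (matrix.length : Int) ∧
        0 ≤ c' + off.2 ∧ c' + off.2 < (matrix.length : Int))
      (f := fun (d : PySem.Dict (Int × Int) Int) (off : Int × Int) =>
        d.insert (r' + off.1, c' + off.2) (d.getD (r' + off.1, c' + off.2) 0 + 1))]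
    rw [pv_foldl_insert_key _ (fun off : Int × Int => (r' + off.1, c' + off.2))]
    rw [PySem.Dict.getD_foldl_insert_add_one]
    rw [count_filter_map]
    congr 1
    apply congrArg List.sum
    apply List.map_congr_left
    intro off _
    refine if_congr ?_ rfl rfl
    simp only [hK, decide_eq_true_eq, true_and]
  · rw [if_neg hK]
    have h0 : ((List.zip pvRows pvCols).map (fun off =>
        if pvCell matrix r' c' = "K" ∧
            (0 ≤ r' + off.1 ∧ r' + off.1 < (matrix.length : Int) ∧
             0 ≤ c' + off.2 ∧ c' + off.2 < (matrix.length : Int)) ∧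
            (r' + off.1, c' + off.2) = k then (1 : Int) else 0)).sum = 0 := by
      apply List.sum_eq_zero
      intro x hx
      obtain ⟨off, -, rfl⟩ := List.mem_map.mp hx
      rw [if_neg]
      rintro ⟨h1, -⟩
      exact hK h1
    rw [h0, add_zero]

-- one column pass of the scatter loop, as "previous + column contributions"
theorem scatter_col (matrix : List (List String)) (r' : Int) (k : Int × Int) :
    ∀ (L : List Int) (d : PySem.Dict (Int × Int) Int),
    ((L.foldl (fun d c' =>
      if pvCell matrix r' c' = "K" then
        (List.zip pvRows pvCols).foldl (fun d off =>
          if 0 ≤ r' + off.1 ∧ r' + off.1 < (matrix.length : Int) ∧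
              0 ≤ c' + off.2 ∧ c' + off.2 < (matrix.length : Int) then
            d.insert (r' + off.1, c' + off.2) (d.getD (r' + off.1, c' + off.2) 0 + 1)
          else d) d
      else d) d).getD k 0) =
      d.getD k 0 + (L.map (fun c' => ((List.zip pvRows pvCols).map (fun off =>
        if pvCell matrix r' c' = "K" ∧
            (0 ≤ r' + off.1 ∧ r' + off.1 < (matrix.length : Int) ∧
             0 ≤ c' + off.2 ∧ c' + off.2 < (matrix.length : Int)) ∧
            (r' + off.1, c' + off.2) = k then (1 : Int) else 0)).sum)).sum := by
  intro L
  induction L with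
  | nil => intro d; simp
  | cons c' L ih =>
    intro d
    rw [List.foldl_cons, ih, scatter_cell matrix r' c' d k, List.map_cons, List.sum_cons]
    ring

-- the whole scatter loop, as a double sum of contributions
theorem scatter_row (matrix : List (List String)) (k : Int × Int) :
    ∀ (L : List Int) (d : PySem.Dict (Int × Int) Int),
    ((L.foldl (fun d r' =>
      (PySem.List.pyRange 0 (matrix.length : Int) 1).foldl (fun d c' =>
        if pvCell matrix r' c' = "K" then
          (List.zip pvRows pvCols).foldl (fun d off =>
            if 0 ≤ r' + off.1 ∧ r' + off.1 < (matrix.length : Int) ∧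
                0 ≤ c' + off.2 ∧ c' + off.2 < (matrix.length : Int) then
              d.insert (r' + off.1, c' + off.2) (d.getD (r' + off.1, c' + off.2) 0 + 1)
            else d) d
        else d) d) d).getD k 0) =
      d.getD k 0 + (L.map (fun r' =>
        ((PySem.List.pyRange 0 (matrix.length : Int) 1).map (fun c' =>
          ((List.zip pvRows pvCols).map (fun off =>
            if pvCell matrix r' c' = "K" ∧
                (0 ≤ r' + off.1 ∧ r' + off.1 < (matrix.length : Int) ∧
                 0 ≤ c' + off.2 ∧ c' + off.2 < (matrix.length : Int)) ∧
                (r' + off.1, c' + off.2) = k then (1 : Int) else 0)).sum)).sum)).sum := by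
  intro L
  induction L with
  | nil => intro d; simp
  | cons r' L ih =>
    intro d
    rw [List.foldl_cons, ih, scatter_col matrix r' k _ d, List.map_cons, List.sum_cons]
    ring

-- one offset's double sum collapses to the indicator of its unique source square
theorem off_term (matrix : List (List String)) (r c dr dc : Int)
    (hr0 : 0 ≤ r) (hr1 : r < (matrix.length : Int))
    (hc0 : 0 ≤ c) (hc1 : c < (matrix.length : Int)) :
    ((PySem.List.pyRange 0 (matrix.length : Int) 1).map (fun r' =>
      ((PySem.List.pyRange 0 (matrix.length : Int) 1).map (fun c' =>
        if pvCell matrix r' c' = "K" ∧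
            (0 ≤ r' + dr ∧ r' + dr < (matrix.length : Int) ∧
             0 ≤ c' + dc ∧ c' + dc < (matrix.length : Int)) ∧
            (r' + dr, c' + dc) = (r, c) then (1 : Int) else 0)).sum)).sum
    = pvInd matrix (r - dr) (c - dc) := by
  rw [← pick2]
  apply congrArg List.sum
  apply List.map_congr_left
  intro r' _
  apply congrArg List.sum
  apply List.map_congr_left
  intro c' _
  refine if_congr ?_ rfl rfl
  constructor
  · rintro ⟨h1, h2, h3⟩
    simp only [Prod.mk.injEq] at h3
    exact ⟨h1, by omega, by omega⟩
  · rintro ⟨h1, h2, h3⟩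
    refine ⟨h1, by omega, ?_⟩
    simp only [Prod.mk.injEq]
    omega

-- B's counter value at an on-board square equals the same 8-term indicator sum (mirrored)
theorem scatter_eq (matrix : List (List String)) (r c : Int)
    (hr0 : 0 ≤ r) (hr1 : r < (matrix.length : Int))
    (hc0 : 0 ≤ c) (hc1 : c < (matrix.length : Int)) :
    (pvCounts matrix).getD (r, c) 0 =
      pvInd matrix (r + 2) (c + 1) + pvInd matrix (r + 2) (c - 1) +
      pvInd matrix (r - 2) (c + 1) + pvInd matrix (r - 2) (c - 1) +
      pvInd matrix (r - 1) (c + 2) + pvInd matrix (r - 1) (c - 2) +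
      pvInd matrix (r + 1) (c + 2) + pvInd matrix (r + 1) (c - 2) := by
  unfold pvCounts
  rw [scatter_row matrix (r, c) _ PySem.Dict.empty, PySem.Dict.getD_empty, zero_add,
    pvOffs_eq]
  simp only [List.map_cons, List.map_nil, List.sum_cons, List.sum_nil, add_zero,
    PySem.List.sum_map_add_int]
  rw [off_term matrix r c (-2) (-1) hr0 hr1 hc0 hc1,
    off_term matrix r c (-2) 1 hr0 hr1 hc0 hc1,
    off_term matrix r c 2 (-1) hr0 hr1 hc0 hc1,
    off_term matrix r c 2 1 hr0 hr1 hc0 hc1,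
    off_term matrix r c 1 (-2) hr0 hr1 hc0 hc1,
    off_term matrix r c 1 2 hr0 hr1 hc0 hc1,
    off_term matrix r c (-1) (-2) hr0 hr1 hc0 hc1,
    off_term matrix r c (-1) 2 hr0 hr1 hc0 hc1]
  have n2 : ∀ x : Int, x - (-2) = x + 2 := fun x => by ring
  have n1 : ∀ x : Int, x - (-1) = x + 1 := fun x => by ring
  simp only [n1, n2]
  ring

-- the two characterisations agree: the counter holds exactly A's kill count
theorem counts_eq_kills (matrix : List (List String)) (r c : Int)
    (hr0 : 0 ≤ r) (hr1 : r < (matrix.length : Int))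
    (hc0 : 0 ≤ c) (hc1 : c < (matrix.length : Int)) :
    (pvCounts matrix).getD (r, c) 0 = pvGetKills matrix r c := by
  rw [scatter_eq matrix r c hr0 hr1 hc0 hc1, gather_eq]; ring

-- ===== VERDICT (by name: the statement is the Claim_ definition above) =====
theorem position_and_max_kills_spec : Claim_equal_position_and_max_kills := by
  intro matrix _ _
  unfold Spec_position_and_max_kills position_and_max_kills position_and_max_kills_alt
  apply PySem.List.foldl_congr_mem
  intro st r hr
  apply PySem.List.foldl_congr_mem
  intro st c hc
  rw [PySem.List.mem_pyRange_one] at hr hc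
  rw [counts_eq_kills matrix r c hr.1 hr.2 hc.1 hc.2]
  by_cases hK : pvCell matrix r c = "K" <;>
    by_cases hlt : pvGetKills matrix r c > st.1 <;>
    simp [hK, hlt]
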